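-- pv_equiv track=rewrite | github.com/Kamlesh-DevOP/Gig_Shield | mcp-layer/server.py | _categorize_hazard
-- ===== SOURCE A (Python) =====
-- def _categorize_hazard(keyword: str) -> str:
--     categories = {
--         "weather": ["flood", "flooding", "waterlogging", "waterlogged", "cyclone", "storm",
--                     "hurricane", "typhoon", "heat wave", "heatwave", "extreme heat",
--                     "landslide", "mudslide", "earthquake"],
--         "civil_unrest": ["strike", "protest", "rally", "bandh", "hartaal", "curfew",
--                          "section 144", "lockdown"],
--         "infrastructure": ["road closure", "road closed", "road block", "barricade",
--                            "power outage", "power cut", "blackout"],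
--         "accident": ["accident", "pile-up", "collision", "fire", "blaze", "inferno"],
--     }
--     for cat, keywords in categories.items():
--         if keyword in keywords:
--             return cat
--     return "other"
-- ===== SOURCE B (Python) =====
-- # Single inverted lookup table: keyword -> category, built once; lookup is one dict.get.
-- _CATEGORY_BY_KEYWORD = {
--     "flood": "weather", "flooding": "weather", "waterlogging": "weather",
--     "waterlogged": "weather", "cyclone": "weather", "storm": "weather",
--     "hurricane": "weather", "typhoon": "weather", "heat wave": "weather",
--     "heatwave": "weather", "extreme heat": "weather", "landslide": "weather",
--     "mudslide": "weather", "earthquake": "weather",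
--     "strike": "civil_unrest", "protest": "civil_unrest", "rally": "civil_unrest",
--     "bandh": "civil_unrest", "hartaal": "civil_unrest", "curfew": "civil_unrest",
--     "section 144": "civil_unrest", "lockdown": "civil_unrest",
--     "road closure": "infrastructure", "road closed": "infrastructure",
--     "road block": "infrastructure", "barricade": "infrastructure",
--     "power outage": "infrastructure", "power cut": "infrastructure",
--     "blackout": "infrastructure",
--     "accident": "accident", "pile-up": "accident", "collision": "accident",
--     "fire": "accident", "blaze": "accident", "inferno": "accident",
-- }
--
-- def _categorize_hazard(keyword: str) -> str:
--     return _CATEGORY_BY_KEYWORD.get(keyword, "other")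
-- ===== Notes on version B (the rewrite author's own statement) =====
-- stated objective: simpler
-- what changed: Replaced the per-category loop with list membership tests by one precomputed inverted keyword->category dict and a single .get with default.
import Mathlib
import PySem

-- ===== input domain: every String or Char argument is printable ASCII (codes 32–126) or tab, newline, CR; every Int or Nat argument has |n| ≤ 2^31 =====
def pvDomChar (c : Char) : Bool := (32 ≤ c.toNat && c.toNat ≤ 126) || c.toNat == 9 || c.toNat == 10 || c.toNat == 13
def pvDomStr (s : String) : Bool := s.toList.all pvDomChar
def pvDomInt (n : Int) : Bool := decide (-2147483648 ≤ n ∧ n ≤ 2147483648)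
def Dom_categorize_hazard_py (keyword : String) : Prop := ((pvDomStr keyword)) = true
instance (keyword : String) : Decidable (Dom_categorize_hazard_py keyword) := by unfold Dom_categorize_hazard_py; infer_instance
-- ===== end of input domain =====

-- B replaces A's per-category loop with list membership tests by one inverted keyword->category dict and a single lookup with default (simpler).

-- ===== PORT A =====
-- A's literal dict (keys are distinct, so Dict.mk of the literal pair list is the dict in insertion order)
def pyCategories : PySem.Dict String (List String) :=
  PySem.Dict.mk [
    ("weather", ["flood", "flooding", "waterlogging", "waterlogged", "cyclone", "storm",
                 "hurricane", "typhoon", "heat wave", "heatwave", "extreme heat",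
                 "landslide", "mudslide", "earthquake"]),
    ("civil_unrest", ["strike", "protest", "rally", "bandh", "hartaal", "curfew",
                      "section 144", "lockdown"]),
    ("infrastructure", ["road closure", "road closed", "road block", "barricade",
                        "power outage", "power cut", "blackout"]),
    ("accident", ["accident", "pile-up", "collision", "fire", "blaze", "inferno"])]

-- 'for cat, keywords in categories.items(): if keyword in keywords: return cat' then 'return "other"'
def catLoop (keyword : String) : List (String × List String) → String
  | [] => "other"
  | (cat, kws) :: rest => if kws.contains keyword then cat else catLoop keyword rest

def categorize_hazard_py (keyword : String) : String :=
  catLoop keyword pyCategories.items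

-- ===== PORT B =====
-- Source B's literal inverted dict (all 35 keys distinct, so Dict.mk of the literal pair list)
def categoryByKeyword : PySem.Dict String String :=
  PySem.Dict.mk [
    ("flood", "weather"), ("flooding", "weather"), ("waterlogging", "weather"),
    ("waterlogged", "weather"), ("cyclone", "weather"), ("storm", "weather"),
    ("hurricane", "weather"), ("typhoon", "weather"), ("heat wave", "weather"),
    ("heatwave", "weather"), ("extreme heat", "weather"), ("landslide", "weather"),
    ("mudslide", "weather"), ("earthquake", "weather"),
    ("strike", "civil_unrest"), ("protest", "civil_unrest"), ("rally", "civil_unrest"),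
    ("bandh", "civil_unrest"), ("hartaal", "civil_unrest"), ("curfew", "civil_unrest"),
    ("section 144", "civil_unrest"), ("lockdown", "civil_unrest"),
    ("road closure", "infrastructure"), ("road closed", "infrastructure"),
    ("road block", "infrastructure"), ("barricade", "infrastructure"),
    ("power outage", "infrastructure"), ("power cut", "infrastructure"),
    ("blackout", "infrastructure"),
    ("accident", "accident"), ("pile-up", "accident"), ("collision", "accident"),
    ("fire", "accident"), ("blaze", "accident"), ("inferno", "accident")]

-- '_CATEGORY_BY_KEYWORD.get(keyword, "other")'
def categorize_hazard_py_alt (keyword : String) : String :=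
  categoryByKeyword.getD keyword "other"

-- ===== PRECONDITION & SPEC =====
def Spec_categorize_hazard_py (keyword : String) (out : String) : Prop := out = categorize_hazard_py_alt keyword
instance (keyword : String) (out : String) : Decidable (Spec_categorize_hazard_py keyword out) := by unfold Spec_categorize_hazard_py; infer_instance

-- ===== CLAIM (what is proved, stated in full; the proofs are below) =====
def Claim_equal_categorize_hazard_py : Prop := ∀ (keyword : String), Dom_categorize_hazard_py keyword → Spec_categorize_hazard_py keyword (categorize_hazard_py keyword)

-- ===== LEMMAS AND PROOFS =====
-- first matching pair in a flat (keyword, category) list, default "other"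
def firstMatch (k : String) : List (String × String) → String
  | [] => "other"
  | (w, c) :: rest => if w == k then c else firstMatch k rest

theorem firstMatch_map_append (k cat : String) (t : List String)
    (r : List (String × String)) :
    firstMatch k (t.map (fun w => (w, cat)) ++ r) =
      if t.contains k then cat else firstMatch k r := by
  induction t with
  | nil => simp
  | cons w t ih =>
    by_cases h : k = w
    · subst h; simp [firstMatch]
    · simp [firstMatch, h, Ne.symm h, ih]

theorem catLoop_eq_firstMatch (k : String) (cats : List (String × List String)) :
    catLoop k cats =
      firstMatch k (cats.flatMap (fun p => p.2.map (fun w => (w, p.1)))) := by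
  induction cats with
  | nil => simp [catLoop, firstMatch]
  | cons p rest ih =>
    obtain ⟨cat, kws⟩ := p
    simp only [catLoop, List.flatMap_cons, firstMatch_map_append, ih]

theorem getD_mk_eq_firstMatch (k : String) (l : List (String × String)) :
    (PySem.Dict.mk l).getD k "other" = firstMatch k l := by
  induction l with
  | nil => simp [firstMatch, PySem.Dict.getD_eq_get?_getD, PySem.Dict.get?]
  | cons p t ih =>
    obtain ⟨w, c⟩ := p
    rw [PySem.Dict.getD_eq_get?_getD, PySem.Dict.get?_mk_cons]
    by_cases h : w == k <;>
      simp [firstMatch, h, ← ih, PySem.Dict.getD_eq_get?_getD]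

theorem categorize_hazard_eq (keyword : String) :
    categorize_hazard_py keyword = categorize_hazard_py_alt keyword := by
  rw [categorize_hazard_py, categorize_hazard_py_alt,
    getD_mk_eq_firstMatch, catLoop_eq_firstMatch]
  rfl

-- ===== VERDICT (by name: the statement is the Claim_ definition above) =====
theorem categorize_hazard_py_spec : Claim_equal_categorize_hazard_py := by
  intro keyword _
  exact categorize_hazard_eq keyword
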